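-- pv_equiv track=rewrite | github.com/clement2987/Password_valt | valt.py | unhash
-- ===== SOURCE A (Python) =====
-- def unhash(n):
--     n = '0x' + n
--     hashed = int(n, 0)
--
--     finish = ''
--
--     while hashed > 0:
--         finish += chr(hashed%1000-3)
--         hashed = hashed // 1000
--
--     return finish
-- ===== SOURCE B (Python) =====
-- def unhash(n):
--     n = '0x' + n
--     hashed = int(n, 0)
--
--     if hashed == 0:
--         return ''
--
--     s = str(hashed)
--     s = '0' * (-len(s) % 3) + s
--
--     finish = ''
--     for i in range(len(s) - 3, -1, -3):
--         finish += chr(int(s[i:i+3]) - 3)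
--
--     return finish
-- ===== Notes on version B (the rewrite author's own statement) =====
-- stated objective: alternative
-- what changed: B decodes by decimal-string chunking: it zero-pads str(hashed) to a multiple of 3 and reads consecutive 3-digit groups back to front with chr(int(group)-3), instead of A's modular-arithmetic loop peeling hashed%1000 / hashed//=1000.
import Mathlib
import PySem

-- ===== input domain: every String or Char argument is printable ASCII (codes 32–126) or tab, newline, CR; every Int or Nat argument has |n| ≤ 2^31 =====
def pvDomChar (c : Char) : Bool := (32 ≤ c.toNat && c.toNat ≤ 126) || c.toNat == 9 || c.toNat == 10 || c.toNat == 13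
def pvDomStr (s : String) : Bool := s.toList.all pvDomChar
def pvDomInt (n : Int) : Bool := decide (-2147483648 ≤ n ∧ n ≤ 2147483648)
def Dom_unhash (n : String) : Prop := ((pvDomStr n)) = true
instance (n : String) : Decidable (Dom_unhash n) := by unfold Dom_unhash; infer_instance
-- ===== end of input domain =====

-- B decodes by string chunking (pad str(hashed) to a multiple of 3 and read 3-digit groups
-- back to front) instead of A's modular-arithmetic peeling; same return value on Pre_.

-- ===== PORT A =====
-- the while loop: finish += chr(hashed % 1000 - 3); hashed = hashed // 1000
def unhashGoA (hashed : Int) (finish : List Char) : List Char :=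
  if h : 0 < hashed then
    unhashGoA (PySem.Int.floordiv hashed 1000)
      (finish ++ [Char.ofNat (PySem.Int.mod hashed 1000 - 3).toNat])
  else finish
termination_by hashed.toNat
decreasing_by
  rw [PySem.Int.floordiv_eq_ediv_of_pos (by omega : (0:Int) < 1000)]
  omega

def unhash (n : String) : String :=
  match PySem.Int.ofStrBase? ("0x" ++ n) 0 with
  | none => ""   -- Python raises ValueError here; excluded by Pre_unhash
  | some hashed => String.mk (unhashGoA hashed [])

-- ===== PORT B =====
def unhash_alt (n : String) : String :=
  match PySem.Int.ofStrBase? ("0x" ++ n) 0 with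
  | none => ""   -- Python raises ValueError here; excluded by Pre_unhash
  | some hashed =>
    if hashed = 0 then ""
    else
      let s0 := PySem.Int.toChars hashed
      let s := List.replicate (PySem.Int.mod (-(s0.length : Int)) 3).toNat '0' ++ s0
      String.mk <|
        (PySem.List.pyRange ((s.length : Int) - 3) (-1) (-3)).foldl
          (fun finish i =>
            finish ++ [Char.ofNat
              ((PySem.Int.ofChars? (PySem.List.slice s (some i) (some (i + 3)))).getD 0 - 3).toNat])
          []

-- ===== PRECONDITION & SPEC =====
-- Pre_unhash = exactly the inputs where Python A returns: n prefixed with the hex marker parses under int(·, 0)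
-- (else ValueError) and every base-1000 digit of the result is ≥ 3 (else chr(…) gets a
-- negative argument and raises ValueError).  The parse of the prefixed string is never negative.
def Pre_unhash (n : String) : Prop :=
  (match PySem.Int.ofStrBase? ("0x" ++ n) 0 with
   | none => false
   | some h =>
     decide (0 ≤ h) &&
     decide (∀ k ≤ Nat.log 1000 h.toNat,
        0 < h.toNat / 1000 ^ k → 3 ≤ h.toNat / 1000 ^ k % 1000)) = true
instance (n : String) : Decidable (Pre_unhash n) := by unfold Pre_unhash; infer_instance

def pvWitness_unhash : String := "65"

def Spec_unhash (n : String) (out : String) : Prop := out = unhash_alt n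
instance (n : String) (out : String) : Decidable (Spec_unhash n out) := by unfold Spec_unhash; infer_instance

-- ===== CLAIM (what is proved, stated in full; the proofs are below) =====
def Claim_equal_unhash : Prop := ∀ (n : String), Dom_unhash n → Pre_unhash n → Spec_unhash n (unhash n)

-- ===== LEMMAS AND PROOFS =====

-- decimal digits of m, most significant first (characterises Nat.toDigits 10)
def decChars (m : Nat) : List Char :=
  if h : m < 10 then [Nat.digitChar m]
  else decChars (m / 10) ++ [Nat.digitChar (m % 10)]
termination_by m
decreasing_by omega

-- the 3-char zero-padded decimal form of r < 1000
def chunk3 (r : Nat) : List Char :=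
  [Nat.digitChar (r / 100 % 10), Nat.digitChar (r / 10 % 10), Nat.digitChar (r % 10)]

-- B's padded string of m
def padded (m : Nat) : List Char :=
  List.replicate ((3 - (decChars m).length % 3) % 3) '0' ++ decChars m

-- A's output char list: base-1000 digits of m, least significant first
def listA (m : Nat) : List Char :=
  if h : m = 0 then []
  else Char.ofNat ((m % 1000 : Nat) - (3:Int)).toNat :: listA (m / 1000)
termination_by m
decreasing_by omega

lemma toDigitsCore_eq (fuel : Nat) : ∀ (m : Nat) (acc : List Char), m < 10 ^ fuel →
    Nat.toDigitsCore 10 (fuel + 1) m acc = decChars m ++ acc := by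
  induction fuel with
  | zero =>
    intro m acc h
    rw [Nat.toDigitsCore]
    rw [if_pos (by omega : m / 10 = 0)]
    rw [decChars, dif_pos (by omega : m < 10)]
    have e : m % 10 = m := by omega
    simp [e]
  | succ fuel ih =>
    intro m acc h
    rw [Nat.toDigitsCore]
    by_cases h10 : m / 10 = 0
    · rw [if_pos h10, decChars, dif_pos (by omega)]
      have e : m % 10 = m := by omega
      simp [e]
    · rw [pow_succ] at h
      rw [if_neg h10, ih (m / 10) _ (by omega)]
      conv_rhs => rw [decChars, dif_neg (show ¬ m < 10 by omega)]
      simp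

lemma toDigits_eq (m : Nat) : Nat.toDigits 10 m = decChars m := by
  have h1 : m < 10 ^ m := Nat.lt_pow_self (by omega)
  simpa using toDigitsCore_eq m m [] h1

lemma decChars_lt10 (r : Nat) (h : r < 10) : decChars r = [Nat.digitChar r] := by
  rw [decChars, dif_pos h]

lemma decChars_lt100 (r : Nat) (h1 : 10 ≤ r) (h2 : r < 100) :
    decChars r = [Nat.digitChar (r / 10), Nat.digitChar (r % 10)] := by
  rw [decChars, dif_neg (by omega), decChars_lt10 _ (by omega)]
  rfl

lemma decChars_lt1000 (r : Nat) (h1 : 100 ≤ r) (h2 : r < 1000) :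
    decChars r = chunk3 r := by
  rw [decChars, dif_neg (by omega), decChars_lt100 _ (by omega) (by omega)]
  have e1 : r / 10 / 10 = r / 100 := by omega
  have e2 : r / 100 % 10 = r / 100 := by omega
  simp [chunk3, e1, e2]

lemma decChars_step (q r : Nat) (hq : 0 < q) (hr : r < 1000) :
    decChars (q * 1000 + r) = decChars q ++ chunk3 r := by
  have e1 : (q * 1000 + r) / 10 = q * 100 + r / 10 := by omega
  have e2 : (q * 100 + r / 10) / 10 = q * 10 + r / 100 := by omega
  have e3 : (q * 10 + r / 100) / 10 = q := by omega
  rw [decChars, dif_neg (by omega), e1,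
      decChars, dif_neg (by omega), e2,
      decChars, dif_neg (by omega), e3]
  have m1 : (q * 1000 + r) % 10 = r % 10 := by omega
  have m2 : (q * 100 + r / 10) % 10 = r / 10 % 10 := by omega
  have m3 : (q * 10 + r / 100) % 10 = r / 100 % 10 := by omega
  simp [chunk3, m1, m2, m3]

lemma padded_small (r : Nat) (h0 : 0 < r) (h : r < 1000) : padded r = chunk3 r := by
  unfold padded
  by_cases h1 : r < 10
  · rw [decChars_lt10 r h1]
    have e1 : r / 100 % 10 = 0 := by omega
    have e2 : r / 10 % 10 = 0 := by omega
    have e3 : r % 10 = r := by omega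
    simp [chunk3, e1, e2, e3, List.replicate]
    rfl
  · by_cases h2 : r < 100
    · rw [decChars_lt100 r (by omega) h2]
      have e1 : r / 100 % 10 = 0 := by omega
      have e2 : r / 10 % 10 = r / 10 := by omega
      simp [chunk3, e1, e2]
      rfl
    · rw [decChars_lt1000 r (by omega) h, chunk3]
      simp

lemma padded_step (q r : Nat) (hq : 0 < q) (hr : r < 1000) :
    padded (q * 1000 + r) = padded q ++ chunk3 r := by
  unfold padded
  rw [decChars_step q r hq hr]
  have hlen : (decChars q ++ chunk3 r).length = (decChars q).length + 3 := by
    simp [chunk3]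
  rw [hlen]
  have : (3 - ((decChars q).length + 3) % 3) % 3 = (3 - (decChars q).length % 3) % 3 := by
    omega
  rw [this, List.append_assoc]

lemma padded_len_mod3 (m : Nat) : (padded m).length % 3 = 0 := by
  unfold padded
  rw [List.length_append, List.length_replicate]
  omega

lemma decChars_ne_nil (m : Nat) : decChars m ≠ [] := by
  rw [decChars]
  split <;> simp

lemma padded_pos (m : Nat) : 0 < (padded m).length := by
  unfold padded
  rw [List.length_append]
  have h := List.length_pos_iff.mpr (decChars_ne_nil m)
  omega

lemma pyRange_neg3 (s : Nat) :
    PySem.List.pyRange ((3 * s : Nat) : Int) (-1) (-3) =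
      (List.range (s + 1)).map (fun k => ((3 * (s - k) : Nat) : Int)) := by
  unfold PySem.List.pyRange
  rw [if_neg (by norm_num), if_neg (by norm_num), if_pos (by omega)]
  have hc : ((((3 * s : Nat) : Int) - -1 + -(-3) - 1) / -(-3)).toNat = s + 1 := by
    norm_num
    omega
  rw [hc]
  apply List.map_congr_left
  intro k hk
  simp only [List.mem_range] at hk
  omega

lemma pyRange_neg3_cons (s : Nat) (hs : 0 < s) :
    PySem.List.pyRange ((3 * s : Nat) : Int) (-1) (-3) =
      ((3 * s : Nat) : Int) :: PySem.List.pyRange ((3 * (s - 1) : Nat) : Int) (-1) (-3) := by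
  rw [pyRange_neg3 s, pyRange_neg3 (s - 1), List.range_succ_eq_map]
  rw [show s - 1 + 1 = s from by omega]
  simp only [List.map_cons, List.map_map, Nat.sub_zero]
  congr 1
  apply List.map_congr_left
  intro k hk
  simp only [List.mem_range] at hk
  simp only [Function.comp_apply]
  congr 1
  omega

lemma slice_chunk (p : List Char) (i : Nat) (h : i + 3 ≤ p.length) :
    PySem.List.slice p (some (i : Int)) (some ((i : Int) + 3)) = (p.drop i).take 3 := by
  simp only [PySem.List.slice, PySem.List.clampIdx]
  rw [if_neg (by omega : ¬ ((i : Int) < 0)), if_neg (by omega : ¬ ((i : Int) + 3 < 0))]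
  have e1 : min (i : Int).toNat p.length = i := by omega
  have e2 : min ((i : Int) + 3).toNat p.length = i + 3 := by omega
  rw [e1, e2]
  rw [show i + 3 - i = 3 from by omega]

set_option maxRecDepth 10000 in
set_option maxHeartbeats 1000000 in
lemma ofChars?_chunk3 : ∀ r : Nat, r < 1000 →
    PySem.Int.ofChars? (chunk3 r) = some (r : Int) := by decide

-- B's per-chunk character extractor
def gB (p : List Char) (i : Int) : Char :=
  Char.ofNat
    ((PySem.Int.ofChars? (PySem.List.slice p (some i) (some (i + 3)))).getD 0 - 3).toNat

lemma gB_last (pfx : List Char) (r : Nat) (hr : r < 1000) :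
    gB (pfx ++ chunk3 r) (pfx.length : Int) = Char.ofNat ((r : Int) - 3).toNat := by
  unfold gB
  rw [slice_chunk _ pfx.length (by simp [chunk3])]
  rw [List.drop_left, List.take_of_length_le (by simp [chunk3])]
  rw [ofChars?_chunk3 r hr]
  rfl

lemma gB_prefix (pfx sfx : List Char) (i : Nat) (h : i + 3 ≤ pfx.length) :
    gB (pfx ++ sfx) (i : Int) = gB pfx (i : Int) := by
  unfold gB
  rw [slice_chunk _ i (by simp; omega), slice_chunk _ i h]
  rw [List.drop_append_of_le_length (by omega)]
  rw [List.take_append_of_le_length (by rw [List.length_drop]; omega)]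

lemma main_chunks (m : Nat) (hm : 0 < m) :
    (PySem.List.pyRange (((padded m).length : Int) - 3) (-1) (-3)).map (gB (padded m)) =
      listA m := by
  induction m using Nat.strong_induction_on with
  | _ m ih =>
    by_cases hq : m < 1000
    · -- single chunk
      rw [padded_small m hm hq]
      have hlen : (chunk3 m).length = 3 := by simp [chunk3]
      rw [hlen]
      rw [show ((3:Nat) : Int) - 3 = ((3 * 0 : Nat) : Int) from by norm_num]
      rw [pyRange_neg3 0]
      simp only [Nat.zero_add, List.range_one, List.map_cons, List.map_nil]
      have hg := gB_last [] m hq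
      simp only [List.nil_append, List.length_nil, Nat.cast_zero] at hg
      rw [show ((3 * (0 - 0) : Nat) : Int) = (0 : Int) from by norm_num, hg]
      rw [listA, dif_neg (by omega), listA, dif_pos (by omega : m / 1000 = 0)]
      have e1 : m % 1000 = m := by omega
      rw [e1]
    · -- m = q * 1000 + r with q > 0
      set q := m / 1000 with hq'
      set r := m % 1000 with hr'
      have hm' : m = q * 1000 + r := by omega
      have hqpos : 0 < q := by omega
      have hrlt : r < 1000 := by omega
      rw [hm', padded_step q r hqpos hrlt]
      have hL3 : (padded q).length % 3 = 0 := padded_len_mod3 q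
      have hLpos : 0 < (padded q).length := padded_pos q
      set L := (padded q).length with hL
      set s := L / 3 with hs
      have hLs : L = 3 * s := by omega
      have hspos : 0 < s := by omega
      have hlen : ((padded q ++ chunk3 r).length : Int) - 3 = ((3 * s : Nat) : Int) := by
        rw [List.length_append, show (chunk3 r).length = 3 from by simp [chunk3], ← hL]
        omega
      rw [hlen, pyRange_neg3_cons s hspos, List.map_cons]
      have hhead : gB (padded q ++ chunk3 r) ((3 * s : Nat) : Int) =
          Char.ofNat ((r : Int) - 3).toNat := by
        have : ((3 * s : Nat) : Int) = ((padded q).length : Int) := by omega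
        rw [this]
        exact gB_last (padded q) r hrlt
      rw [hhead]
      have htail : (PySem.List.pyRange ((3 * (s - 1) : Nat) : Int) (-1) (-3)).map (gB (padded q ++ chunk3 r)) =
          (PySem.List.pyRange ((3 * (s - 1) : Nat) : Int) (-1) (-3)).map (gB (padded q)) := by
        apply List.map_congr_left
        intro i hi
        rw [pyRange_neg3 (s - 1)] at hi
        simp only [List.mem_map, List.mem_range] at hi
        obtain ⟨k, hk, rfl⟩ := hi
        apply gB_prefix
        omega
      rw [htail]
      have hih : (PySem.List.pyRange (((padded q).length : Int) - 3) (-1) (-3)).map (gB (padded q)) = listA q :=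
        ih q (by omega) hqpos
      have harg : ((padded q).length : Int) - 3 = ((3 * (s - 1) : Nat) : Int) := by
        push_cast; omega
      rw [harg] at hih
      rw [hih]
      conv_rhs => rw [listA]
      rw [dif_neg (show ¬ (q * 1000 + r = 0) from by omega)]
      have e1 : (q * 1000 + r) % 1000 = r := by omega
      have e2 : (q * 1000 + r) / 1000 = q := by omega
      rw [e1, e2]

lemma goA_acc (m : Nat) (acc : List Char) : unhashGoA (m : Int) acc = acc ++ listA m := by
  induction m using Nat.strong_induction_on generalizing acc with
  | _ m ih =>
    by_cases hm : m = 0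
    · subst hm
      rw [unhashGoA, dif_neg (by omega), listA, dif_pos rfl]
      simp
    · rw [unhashGoA, dif_pos (by omega)]
      rw [PySem.Int.floordiv_eq_ediv_of_pos (by omega : (0:Int) < 1000)]
      rw [PySem.Int.mod_eq_emod_of_pos (by omega : (0:Int) < 1000)]
      have e1 : (m : Int) / 1000 = ((m / 1000 : Nat) : Int) := by omega
      have e2 : (m : Int) % 1000 = ((m % 1000 : Nat) : Int) := by omega
      rw [e1, e2, ih (m / 1000) (by omega)]
      conv_rhs => rw [listA]
      rw [dif_neg hm]
      simp

-- ===== VERDICT (by name: the statement is the Claim_ definition above) =====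
theorem unhash_spec : Claim_equal_unhash := by
  intro n _ hpre
  unfold Spec_unhash unhash unhash_alt
  unfold Pre_unhash at hpre
  cases hp : PySem.Int.ofStrBase? ("0x" ++ n) 0 with
  | none => simp [hp] at hpre ⊢
  | some h =>
    rw [hp] at hpre
    simp only [Bool.and_eq_true, decide_eq_true_eq] at hpre
    obtain ⟨hnn, -⟩ := hpre
    simp only
    obtain ⟨m, rfl⟩ : ∃ m : Nat, h = (m : Int) := ⟨h.toNat, by omega⟩
    by_cases hm : m = 0
    · subst hm
      rw [if_pos (show ((0:Nat) : Int) = 0 from by norm_num)]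
      rw [goA_acc 0 [], listA, dif_pos rfl]
      rfl
    · rw [if_neg (by exact_mod_cast hm)]
      rw [goA_acc m [], List.nil_append]
      congr 1
      rw [PySem.List.foldl_append_singleton_eq_map, List.nil_append]
      -- identify the padded string with `padded m`
      have htc : PySem.Int.toChars (m : Int) = decChars m := by
        unfold PySem.Int.toChars
        rw [if_neg (by omega)]
        rw [show ((m : Int)).toNat = m by omega]
        exact toDigits_eq m
      have hmod : (PySem.Int.mod (-((decChars m).length : Int)) 3).toNat =
          (3 - (decChars m).length % 3) % 3 := by
        rw [PySem.Int.mod_eq_emod_of_pos (by omega : (0:Int) < 3)]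
        omega
      rw [htc, hmod]
      have hpad : List.replicate ((3 - (decChars m).length % 3) % 3) '0' ++ decChars m = padded m := rfl
      rw [hpad]
      exact (main_chunks m (by omega)).symm
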